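-- pv_equiv track=rewrite | github.com/jmelot/lodc | clean_2023_data.py | get_canonical_row
-- ===== SOURCE A (Python) =====
-- def get_canonical_row(rows: list) -> dict:
--     """
--
--     :param rows:
--     :return:
--     """
--     best_row = {}
--     for row in rows:
--         row_copy = {k: v for k, v in row.items()}
--         for k in row:
--             if not row[k]:
--                 row_copy.pop(k)
--         best_row.update(row_copy)
--     return best_row
-- ===== SOURCE B (Python) =====
-- def get_canonical_row(rows: list) -> dict:
--     # Two-phase alternative: first record, in order of first truthy appearance,
--     # every key that ever carries a truthy value; then a single backward pass
--     # keeps, per key, the first truthy value seen (= the last truthy value in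
--     # forward order).  No per-row copies, nothing is ever overwritten, and the
--     # input rows are not mutated.
--     keys = {}
--     for row in rows:
--         for k, v in row.items():
--             if v and k not in keys:
--                 keys[k] = v
--     last = {}
--     for row in reversed(rows):
--         for k, v in row.items():
--             if v and k not in last:
--                 last[k] = v
--     result = {}
--     for k in keys:
--         if k in last:
--             result[k] = last[k]
--     return result
-- ===== Notes on version B (the rewrite author's own statement) =====
-- stated objective: alternative
-- what changed: B replaces A's forward copy-drop-empties-overwrite merge with a two-phase algorithm: a forward pass recording the keys in order of first truthy appearance, then a single backward pass that keeps the first truthy value seen per key (= the last truthy value forward); nothing is copied per row and nothing is ever overwritten.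
import Mathlib
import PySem

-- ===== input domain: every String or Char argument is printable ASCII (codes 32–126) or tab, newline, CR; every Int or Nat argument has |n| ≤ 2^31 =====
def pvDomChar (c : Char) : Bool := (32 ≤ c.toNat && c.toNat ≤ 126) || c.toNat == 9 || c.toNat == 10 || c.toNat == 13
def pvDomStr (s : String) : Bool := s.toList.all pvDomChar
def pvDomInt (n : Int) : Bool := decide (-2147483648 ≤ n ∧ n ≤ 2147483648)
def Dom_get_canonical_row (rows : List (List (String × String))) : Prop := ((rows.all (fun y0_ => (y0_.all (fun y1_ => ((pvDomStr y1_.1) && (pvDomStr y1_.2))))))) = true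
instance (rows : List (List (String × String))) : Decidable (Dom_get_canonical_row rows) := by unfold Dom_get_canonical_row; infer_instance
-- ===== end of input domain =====

-- B is an alternative two-phase algorithm (collect keys in order of first truthy
-- appearance, then find each key's last truthy value scanning rows backwards);
-- equal return value, same cost class, no per-row copies.

-- ===== PORT A =====
-- Each Python row is a dict; its assoc-list argument is read through Dict.ofList.
def get_canonical_row (rows : List (List (String × String))) : List (String × String) :=
  (rows.foldl (fun best_row row =>
      let rowd := PySem.Dict.ofList row
      -- row_copy = {k: v for k, v in row.items()}
      let row_copy := PySem.Dict.ofList rowd.items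
      -- for k in row: if not row[k]: row_copy.pop(k)   (k is present, so pop = erase)
      let row_copy := rowd.keys.foldl (fun rc k =>
          if rowd.getD k "" = "" then rc.erase k else rc) row_copy
      best_row.update row_copy.items)
    PySem.Dict.empty).items

-- ===== PORT B =====
def get_canonical_row_alt (rows : List (List (String × String))) : List (String × String) :=
  -- phase 1: keys = {}; forward pass recording each key's first truthy appearance
  let keys := rows.foldl (fun ks row =>
      (PySem.Dict.ofList row).items.foldl (fun ks kv =>
        if (kv.2 != "") && !(ks.contains kv.1) then ks.insert kv.1 kv.2 else ks) ks)
    (PySem.Dict.empty : PySem.Dict String String)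
  -- phase 2: last = {}; backward pass keeping the first truthy value seen per key
  let last := rows.reverse.foldl (fun la row =>
      (PySem.Dict.ofList row).items.foldl (fun la kv =>
        if (kv.2 != "") && !(la.contains kv.1) then la.insert kv.1 kv.2 else la) la)
    (PySem.Dict.empty : PySem.Dict String String)
  -- result: for k in keys: if k in last: result[k] = last[k]
  let result := keys.keys.foldl (fun res k =>
      match last.get? k with
      | some v => res.insert k v
      | none => res) (PySem.Dict.empty : PySem.Dict String String)
  result.items

-- ===== PRECONDITION & SPEC =====
def Spec_get_canonical_row (rows : List (List (String × String))) (out : List (String × String)) : Prop := out = get_canonical_row_alt rows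
instance (rows : List (List (String × String))) (out : List (String × String)) : Decidable (Spec_get_canonical_row rows out) := by unfold Spec_get_canonical_row; infer_instance

-- ===== CLAIM (what is proved, stated in full; the proofs are below) =====
def Claim_equal_get_canonical_row : Prop := ∀ (rows : List (List (String × String))), Dom_get_canonical_row rows → Spec_get_canonical_row rows (get_canonical_row rows)

-- ===== LEMMAS AND PROOFS =====

-- the truthy items of a (deduplicated) row, in order
def pvTru (l : List (String × String)) : List (String × String) := l.filter (fun kv => kv.2 != "")

-- the forward stream of truthy (key, value) pairs
def pvPs (rows : List (List (String × String))) : List (String × String) :=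
  (rows.map (fun row => pvTru (PySem.Dict.ofList row).items)).flatten

def pvIns (d : PySem.Dict String String) (kv : String × String) : PySem.Dict String String :=
  d.insert kv.1 kv.2

-- a dict built from pairs whose keys are already distinct is those pairs
theorem pv_ofList_nodup (l : List (String × String)) (h : (l.map Prod.fst).Nodup) :
    PySem.Dict.ofList l = PySem.Dict.mk l := by
  apply PySem.Dict.ext
  have hf := PySem.Dict.items_foldl_insert_fresh l Prod.fst Prod.snd
      (PySem.Dict.empty : PySem.Dict String String)
      (fun a _ => by simp [PySem.Dict.contains_empty]) h
  simpa [PySem.Dict.ofList, PySem.Dict.update, PySem.Dict.empty] using hf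

-- erasing, from d, the keys of ks that satisfy pr filters d.items
theorem pv_eraseFold (ks : List String) (pr : String → Prop) [DecidablePred pr]
    (d : PySem.Dict String String) :
    (ks.foldl (fun rc k => if pr k then rc.erase k else rc) d).items
      = d.items.filter (fun kv => !(ks.contains kv.1 && decide (pr kv.1))) := by
  induction ks generalizing d with
  | nil => simp
  | cons k t ih =>
    simp only [List.foldl_cons]
    by_cases hp : pr k
    · rw [if_pos hp, ih]
      simp only [PySem.Dict.erase, List.filter_filter]
      apply List.filter_congr
      intro kv _
      by_cases hk : kv.1 = k
      · subst hk; simp [hp]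
      · simp [hk]
    · rw [if_neg hp, ih]
      apply List.filter_congr
      intro kv _
      by_cases hk : kv.1 = k
      · subst hk; simp [hp]
      · simp [hk]

-- A's per-row copy-and-pop keeps exactly the truthy items
theorem pv_rowcopy (row : List (String × String)) :
    ((PySem.Dict.ofList row).keys.foldl (fun rc k =>
        if (PySem.Dict.ofList row).getD k "" = "" then rc.erase k else rc)
      (PySem.Dict.ofList (PySem.Dict.ofList row).items)).items
      = pvTru (PySem.Dict.ofList row).items := by
  have hnd : (PySem.Dict.ofList row).keys.Nodup := PySem.Dict.nodup_keys_ofList row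
  have hnd' : ((PySem.Dict.ofList row).items.map Prod.fst).Nodup := hnd
  rw [pv_ofList_nodup _ hnd', pv_eraseFold]
  apply List.filter_congr
  intro kv hkv
  have hmem : kv.1 ∈ (PySem.Dict.ofList row).keys := by
    simp only [PySem.Dict.keys]
    exact List.mem_map_of_mem hkv
  have hv : (PySem.Dict.ofList row).getD kv.1 "" = kv.2 := by
    have : (kv.1, kv.2) ∈ (PySem.Dict.ofList row).items := by simpa using hkv
    exact PySem.Dict.getD_of_mem_items _ this hnd ""
  simp [hmem, hv, bne]
  cases h : kv.2 == "" <;> simp_all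

-- A's whole fold is one insert-fold over the truthy pair stream
theorem pv_A_dict (rows : List (List (String × String))) :
    (rows.foldl (fun best_row row =>
        let rowd := PySem.Dict.ofList row
        let row_copy := PySem.Dict.ofList rowd.items
        let row_copy := rowd.keys.foldl (fun rc k =>
            if rowd.getD k "" = "" then rc.erase k else rc) row_copy
        best_row.update row_copy.items)
      PySem.Dict.empty)
      = (pvPs rows).foldl pvIns PySem.Dict.empty := by
  rw [pvPs, List.foldl_flatten, List.foldl_map]
  apply PySem.List.foldl_congr_mem
  intro acc row _
  simp only [pv_rowcopy row]
  rfl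

-- lookup in an insert-fold is the last binding
theorem pv_get?_foldl_ins (l : List (String × String)) (d : PySem.Dict String String) (k : String) :
    ((l.foldl pvIns d).get? k)
      = ((l.reverse.find? (fun kv => kv.1 == k)).map Prod.snd).or (d.get? k) := by
  induction l generalizing d with
  | nil => simp
  | cons kv t ih =>
    simp only [List.foldl_cons, List.reverse_cons, List.find?_append, ih]
    cases h : List.find? (fun kv => kv.1 == k) t.reverse with
    | some p => simp [h]
    | none =>
      by_cases hk : kv.1 = k
      · simp [hk, pvIns, List.find?]
      · have hb : (kv.1 == k) = false := by simp [hk]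
        simp [pvIns, PySem.Dict.get?_insert, List.find?, Ne.symm hk, hb]

-- the conditional "keep the first truthy binding" step shared by B's two passes
def pvSd (d : PySem.Dict String String) (kv : String × String) : PySem.Dict String String :=
  if (kv.2 != "") && !(d.contains kv.1) then d.insert kv.1 kv.2 else d

-- B's per-pass fold over a whole row list is one pvSd-fold over the flat item stream
theorem pv_B_flat (rows : List (List (String × String))) (d : PySem.Dict String String) :
    (rows.foldl (fun la row =>
        (PySem.Dict.ofList row).items.foldl (fun la kv =>
          if (kv.2 != "") && !(la.contains kv.1) then la.insert kv.1 kv.2 else la) la) d)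
      = ((rows.map (fun row => (PySem.Dict.ofList row).items)).flatten).foldl pvSd d := by
  rw [List.foldl_flatten, List.foldl_map]
  rfl

-- filtering the flat stream row-wise
theorem pv_tru_flat (rs : List (List (String × String))) :
    pvTru ((rs.map (fun row => (PySem.Dict.ofList row).items)).flatten)
      = (rs.map (fun row => pvTru (PySem.Dict.ofList row).items)).flatten := by
  simp only [pvTru, List.filter_flatten, List.map_map]
  rfl

-- keys accumulated by a pvSd-fold: the distinct truthy keys, in order
theorem pv_keys_sd (l : List (String × String)) (d : PySem.Dict String String) :
    (l.foldl pvSd d).keys = PySem.Set.update d.keys ((pvTru l).map Prod.fst) := by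
  induction l generalizing d with
  | nil => simp [pvTru, PySem.Set.update]
  | cons kv t ih =>
    by_cases hv : kv.2 = ""
    · have hb : (kv.2 != "") = false := by simp [bne, hv]
      simp only [List.foldl_cons, pvSd, hb, Bool.false_and, Bool.false_eq_true, if_false]
      rw [ih]
      simp [pvTru, hb]
    · have hb : (kv.2 != "") = true := by simp [bne, hv]
      have hset : (pvSd d kv).keys = PySem.Set.add d.keys kv.1 := by
        rw [pvSd, hb, Bool.true_and]
        cases hc : d.contains kv.1 with
        | true =>
          have : kv.1 ∈ d.keys := by
            rw [PySem.Dict.contains_eq_decide_mem_keys] at hc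
            simpa using hc
          simp [PySem.Set.add, this]
        | false =>
          have : kv.1 ∉ d.keys := by
            rw [PySem.Dict.contains_eq_decide_mem_keys] at hc
            simpa using hc
          simp [PySem.Set.add, this, PySem.Dict.keys_insert_of_not_contains d kv.2 hc]
      rw [List.foldl_cons, ih, hset]
      simp [pvTru, hb, PySem.Set.update]

-- lookup in a pvSd-fold: what was there first, else the first truthy binding of the stream
theorem pv_get?_sd (l : List (String × String)) (d : PySem.Dict String String) (k : String) :
    ((l.foldl pvSd d).get? k)
      = (d.get? k).or (((pvTru l).find? (fun kv => kv.1 == k)).map Prod.snd) := by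
  induction l generalizing d with
  | nil => simp [pvTru]
  | cons kv t ih =>
    rw [List.foldl_cons, ih]
    by_cases hv : kv.2 = ""
    · have hb : (kv.2 != "") = false := by simp [bne, hv]
      simp [pvSd, hb, pvTru]
    · have hb : (kv.2 != "") = true := by simp [bne, hv]
      have htru : pvTru (kv :: t) = kv :: pvTru t := by simp [pvTru, hb]
      rw [htru]
      by_cases hk : kv.1 = k
      · subst hk
        cases hc : d.contains kv.1 with
        | true =>
          have hsome : ∃ v, d.get? kv.1 = some v := by
            have := PySem.Dict.contains_eq_isSome_get? d kv.1
            rw [hc] at this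
            exact Option.isSome_iff_exists.1 this.symm
          obtain ⟨v, hvv⟩ := hsome
          simp [pvSd, hb, hc, hvv, List.find?]
        | false =>
          have hnone : d.get? kv.1 = none := by
            have := PySem.Dict.contains_eq_isSome_get? d kv.1
            rw [hc] at this
            cases hg : d.get? kv.1 with
            | none => rfl
            | some v => rw [hg] at this; simp at this
          simp [pvSd, hb, hc, hnone, List.find?, PySem.Dict.get?_insert_self]
      · have hbk : (kv.1 == k) = false := by simp [hk]
        have hfind : List.find? (fun kv => kv.1 == k) (kv :: pvTru t)
            = List.find? (fun kv => kv.1 == k) (pvTru t) := List.find?_cons_of_neg (by simp [hbk])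
        rw [hfind]
        cases hc : (!d.contains kv.1) with
        | false => simp [pvSd, hb, hc]
        | true =>
          simp only [pvSd, hb, hc, Bool.true_and, if_true]
          rw [PySem.Dict.get?_insert_of_ne _ _ (Ne.symm hk)]

-- in a list with distinct keys, the unique key match is found from either end
theorem pv_find?_reverse (l : List (String × String)) (k : String)
    (h : (l.map Prod.fst).Nodup) :
    l.reverse.find? (fun kv => kv.1 == k) = l.find? (fun kv => kv.1 == k) := by
  induction l with
  | nil => simp
  | cons kv t ih =>
    simp only [List.map_cons, List.nodup_cons] at h
    obtain ⟨hk, ht⟩ := h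
    rw [List.reverse_cons, List.find?_append, ih ht]
    by_cases he : kv.1 = k
    · have : t.find? (fun kv => kv.1 == k) = none := by
        apply List.find?_eq_none.2
        intro x hx
        simp only [beq_iff_eq]
        intro hxk
        exact hk (by rw [he, ← hxk]; exact List.mem_map_of_mem hx)
      simp [this, List.find?, he]
    · have hb : (kv.1 == k) = false := by simp [he]
      simp [List.find?, hb]

-- keys of a filtered dedup row stay distinct
theorem pv_tru_nodup (l : List (String × String)) (h : (l.map Prod.fst).Nodup) :
    ((pvTru l).map Prod.fst).Nodup := by
  have hs : (pvTru l).Sublist l := List.filter_sublist ..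
  exact (hs.map Prod.fst).nodup h

-- the backward flat truthy stream finds the same first match as the reversed forward stream
theorem pv_streams (rows : List (List (String × String))) (k : String) :
    ((rows.reverse.map (fun row => pvTru (PySem.Dict.ofList row).items)).flatten).find?
        (fun kv => kv.1 == k)
      = (pvPs rows).reverse.find? (fun kv => kv.1 == k) := by
  rw [pvPs, List.reverse_flatten, List.find?_flatten, List.find?_flatten,
    ← List.map_reverse, ← List.map_reverse]
  simp only [List.findSome?_map]
  apply congrArg (fun f => List.findSome? f rows.reverse)
  funext row
  have hnd : ((PySem.Dict.ofList row).items.map Prod.fst).Nodup :=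
    PySem.Dict.nodup_keys_ofList row
  simp only [Function.comp]
  exact (pv_find?_reverse _ k (pv_tru_nodup _ hnd)).symm

-- ===== VERDICT (by name: the statement is the Claim_ definition above) =====
theorem get_canonical_row_spec : Claim_equal_get_canonical_row := by
  intro rows _
  unfold Spec_get_canonical_row get_canonical_row get_canonical_row_alt
  rw [pv_A_dict, pv_B_flat rows, pv_B_flat rows.reverse]
  set K := PySem.Set.ofList ((pvPs rows).map Prod.fst) with hK
  have hKnd : K.Nodup := PySem.Set.nodup_ofList _
  -- phase-1 dict carries exactly the keys K
  have hkeys : (((rows.map (fun row => (PySem.Dict.ofList row).items)).flatten).foldl pvSd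
      (PySem.Dict.empty : PySem.Dict String String)).keys = K := by
    rw [pv_keys_sd, pv_tru_flat]
    rfl
  -- phase-2 dict looks up the last truthy binding of the forward stream
  have hlast : ∀ k, (((rows.reverse.map (fun row => (PySem.Dict.ofList row).items)).flatten).foldl
        pvSd (PySem.Dict.empty : PySem.Dict String String)).get? k
      = ((pvPs rows).reverse.find? (fun kv => kv.1 == k)).map Prod.snd := by
    intro k
    rw [pv_get?_sd, pv_tru_flat, pv_streams]
    rfl
  simp only [hkeys, hlast]
  -- each key of K has a (truthy) last value
  have hval : ∀ k ∈ K, ∃ p, (pvPs rows).reverse.find? (fun kv => kv.1 == k) = some p := by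
    intro k hkK
    have : k ∈ (pvPs rows).map Prod.fst := (PySem.Set.mem_ofList _ _).1 hkK
    obtain ⟨kv, hkv, hfst⟩ := List.mem_map.1 this
    have : ∃ x ∈ (pvPs rows).reverse, ((fun kv => kv.1 == k) x) = true :=
      ⟨kv, List.mem_reverse.2 hkv, by simp [hfst]⟩
    obtain ⟨p, hp⟩ := Option.isSome_iff_exists.1 (List.find?_isSome.2 this)
    exact ⟨p, hp⟩
  have hfold : (K.foldl (fun res k =>
        match ((pvPs rows).reverse.find? (fun kv => kv.1 == k)).map Prod.snd with
        | some v => res.insert k v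
        | none => res) (PySem.Dict.empty : PySem.Dict String String))
      = K.foldl (fun res k =>
          res.insert k ((((pvPs rows).reverse.find? (fun kv => kv.1 == k)).map Prod.snd).getD ""))
        PySem.Dict.empty := by
    apply PySem.List.foldl_congr_mem
    intro acc k hkK
    obtain ⟨p, hp⟩ := hval k hkK
    simp [hp]
  rw [hfold]
  have hBitems := PySem.Dict.items_foldl_insert_fresh K id
      (fun k => (((pvPs rows).reverse.find? (fun kv => kv.1 == k)).map Prod.snd).getD "")
      (PySem.Dict.empty : PySem.Dict String String)
      (fun a _ => by simp [PySem.Dict.contains_empty]) (by simpa using hKnd)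
  simp only [id] at hBitems
  have hBitems2 : (K.foldl (fun d a =>
        d.insert a ((((pvPs rows).reverse.find? (fun kv => kv.1 == a)).map Prod.snd).getD ""))
        (PySem.Dict.empty : PySem.Dict String String)).items
      = K.map (fun a =>
          (a, (((pvPs rows).reverse.find? (fun kv => kv.1 == a)).map Prod.snd).getD "")) := by
    rw [hBitems]; rfl
  rw [hBitems2]
  -- A's side: keys and values of the insert-fold
  have hkeysA : ((pvPs rows).foldl pvIns PySem.Dict.empty).keys = K := by
    unfold pvIns
    rw [PySem.Dict.keys_foldl_insert_key (pvPs rows) Prod.fst (fun _ x => x.2) PySem.Dict.empty]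
    rfl
  have hndA : ((pvPs rows).foldl pvIns PySem.Dict.empty).keys.Nodup := by
    rw [hkeysA]; exact hKnd
  rw [PySem.Dict.items_eq_map_keys _ hndA "", hkeysA]
  apply List.map_congr_left
  intro k _
  rw [PySem.Dict.getD_eq_get?_getD, pv_get?_foldl_ins]
  rw [show (PySem.Dict.empty : PySem.Dict String String).get? k = none from rfl, Option.or_none]
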